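-- pv_equiv track=rewrite | github.com/SimedDataTeam/snomed_embedding | src/src_benchmark/build_snomed_benchmark.py | find_unique_multiparent_nodes
-- ===== SOURCE A (Python) =====
-- def find_unique_multiparent_nodes(reverse_graph):
--     """
--     Find nodes that have multiple parents and whose set of parents is unique to them.
--
--     Args:
--         reverse_graph (dict): A dictionary where keys are node IDs and values are lists of parent IDs
--
--     Returns:
--         list: List of node IDs that have multiple parents and whose parent set is unique
--     """
--     # Store parent sets for each node
--     parent_sets = {}
--
--     # Create a set of parents for each node
--     for node_id, parents in reverse_graph.items():
--         # Convert parents list to frozenset for hashability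
--         parent_set = frozenset(parents)
--         if len(parent_set) > 1:  # Only consider nodes with multiple parents
--             if parent_set in parent_sets:
--                 parent_sets[parent_set].append(node_id)
--             else:
--                 parent_sets[parent_set] = [node_id]
--
--     # Find nodes with unique parent sets
--     result = []
--     for parent_set, nodes in parent_sets.items():
--         if len(nodes) == 1:  # Only one node has this exact set of parents
--             result.append(nodes[0])
--
--     return result
-- ===== SOURCE B (Python) =====
-- def find_unique_multiparent_nodes(reverse_graph):
--     # Sort-based: canonicalise each multi-parent set as a sorted tuple, sort all
--     # entries by that key, detect singleton runs by neighbour comparison, then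
--     # restore input order by sorting the picked entries on their original index.
--     entries = []
--     for i, (node_id, parents) in enumerate(reverse_graph.items()):
--         key = tuple(sorted(set(parents)))
--         if len(key) > 1:
--             entries.append((key, i, node_id))
--     entries.sort(key=lambda t: t[0])
--     picked = []
--     j, n = 0, len(entries)
--     while j < n:
--         k = j + 1
--         while k < n and entries[k][0] == entries[j][0]:
--             k += 1
--         if k == j + 1:
--             picked.append((entries[j][1], entries[j][2]))
--         j = k
--     picked.sort(key=lambda t: t[0])
--     return [node_id for _, node_id in picked]
-- ===== Notes on version B (the rewrite author's own statement) =====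
-- stated objective: alternative
-- what changed: A groups nodes in a hash dict keyed by their parent-frozenset and scans the groups for singletons; B uses no hashing at all: it canonicalises each multi-parent set as a sorted tuple, sorts the entries by that key, detects unique keys as singleton runs by neighbour comparison, and restores input order by re-sorting the survivors on their original index.
import Mathlib
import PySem

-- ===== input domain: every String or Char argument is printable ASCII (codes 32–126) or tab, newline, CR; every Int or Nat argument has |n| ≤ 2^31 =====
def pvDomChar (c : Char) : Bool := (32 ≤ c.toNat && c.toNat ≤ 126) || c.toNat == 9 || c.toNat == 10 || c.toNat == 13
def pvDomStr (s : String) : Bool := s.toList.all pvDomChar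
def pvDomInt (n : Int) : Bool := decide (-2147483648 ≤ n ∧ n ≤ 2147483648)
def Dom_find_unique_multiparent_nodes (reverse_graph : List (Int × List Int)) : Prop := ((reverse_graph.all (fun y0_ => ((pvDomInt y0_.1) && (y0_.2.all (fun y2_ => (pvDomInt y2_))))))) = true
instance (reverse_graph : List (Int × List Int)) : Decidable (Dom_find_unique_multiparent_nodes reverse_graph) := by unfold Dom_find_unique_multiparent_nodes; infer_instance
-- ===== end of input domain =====

-- B replaces A's hash-grouping (dict keyed by parent-frozenset, then a scan over the groups)
-- by a sort-based algorithm: sort the multi-parent entries by their canonical key, detect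
-- unique keys as singleton runs by neighbour comparison, and restore input order by sorting
-- the picked entries on their original index (same result; a genuinely different algorithm).

-- ===== PORT A =====
-- frozenset(parents) modelled canonically as the sorted list of the distinct parents:
-- two frozensets are equal iff these lists are equal, and len(frozenset) is the list's length,
-- so dict lookup keyed by frozenset is exact under this key.
def pvFrozen (p : List Int) : List Int :=
  PySem.List.sorted (PySem.List.dedup p) (fun x => x) false

def find_unique_multiparent_nodes (reverse_graph : List (Int × List Int)) : List Int :=
  let parent_sets : PySem.Dict (List Int) (List Int) :=
    reverse_graph.foldl (fun d e =>
      let parent_set := pvFrozen e.2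
      if 1 < parent_set.length then
        if d.contains parent_set then
          d.insert parent_set (d.getD parent_set [] ++ [e.1])  -- parent_sets[parent_set].append(node_id)
        else
          d.insert parent_set [e.1]
      else d) PySem.Dict.empty
  parent_sets.items.foldl (fun result p =>
      if p.2.length = 1 then
        result ++ [PySem.List.pyGetD p.2 0 0]  -- nodes[0]: in range, since len(nodes) == 1
      else result) []

-- ===== PORT B =====
-- entries.sort(key=lambda t: t[0]): Python compares the int-tuple keys lexicographically,
-- which is exactly the (linear) lexicographic order on List Int (instances given explicitly
-- so the order lemmas about PySem.List.sorted apply).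
def pvSortK (xs : List (List Int × Int × Int)) : List (List Int × Int × Int) :=
  @PySem.List.sorted _ _ Preorder.toLT LinearOrder.toDecidableLT xs (fun t => t.1) false

-- picked.sort(key=lambda t: t[0])
def pvSortI (xs : List (Int × Int)) : List (Int × Int) :=
  @PySem.List.sorted _ _ Preorder.toLT LinearOrder.toDecidableLT xs (fun t => t.1) false

-- the two nested while loops: walk the key-sorted list run by run, keeping the
-- (index, node_id) of each run of length one
def pvRunScan : List (List Int × Int × Int) → List (Int × Int)
  | [] => []
  | t :: rest =>
    (if rest.takeWhile (fun u => u.1 == t.1) = [] then [(t.2.1, t.2.2)] else []) ++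
      pvRunScan (rest.dropWhile (fun u => u.1 == t.1))
  termination_by l => l.length
  decreasing_by
    simp only [List.length_cons]
    exact Nat.lt_succ_of_le (List.length_dropWhile_le _ _)

def find_unique_multiparent_nodes_alt (reverse_graph : List (Int × List Int)) : List Int :=
  let entries : List (List Int × Int × Int) :=
    (PySem.List.enumerate reverse_graph).foldl (fun acc e =>
      let key := pvFrozen e.2.2   -- tuple(sorted(set(parents)))
      if 1 < key.length then acc ++ [(key, e.1, e.2.1)] else acc) []
  let sortedE := pvSortK entries
  let picked := pvRunScan sortedE
  (pvSortI picked).map (fun t => t.2)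

-- ===== PRECONDITION & SPEC =====
def Spec_find_unique_multiparent_nodes (reverse_graph : List (Int × List Int)) (out : List Int) : Prop := out = find_unique_multiparent_nodes_alt reverse_graph
instance (reverse_graph : List (Int × List Int)) (out : List Int) : Decidable (Spec_find_unique_multiparent_nodes reverse_graph out) := by unfold Spec_find_unique_multiparent_nodes; infer_instance

-- ===== CLAIM (what is proved, stated in full; the proofs are below) =====
def Claim_equal_find_unique_multiparent_nodes : Prop := ∀ (reverse_graph : List (Int × List Int)), Dom_find_unique_multiparent_nodes reverse_graph → Spec_find_unique_multiparent_nodes reverse_graph (find_unique_multiparent_nodes reverse_graph)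

-- ===== LEMMAS AND PROOFS =====

-- the key of an input entry (its parent frozenset)
def pvKey (e : Int × List Int) : List Int := pvFrozen e.2

-- the multi-parent entries of the input, in order
def pvMs (rg : List (Int × List Int)) : List (Int × List Int) :=
  rg.filter (fun e => decide (1 < (pvFrozen e.2).length))

-- the common normal form both programs are reduced to: the multi-parent entries whose
-- key occurs exactly once, in input order, projected to the node id
def pvS (rg : List (Int × List Int)) : List Int :=
  ((pvMs rg).filter (fun e => decide (List.count (pvKey e) ((pvMs rg).map pvKey) = 1))).map Prod.fst

-- ---------- A-side ----------

-- the group of node ids sharing key k, in input order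
def pvGrp (ms : List (Int × List Int)) (k : List Int) : List Int :=
  (ms.filter (fun e => pvKey e == k)).map Prod.fst

-- the unique entry with key k, if there is exactly one
def pvMatch (ms : List (Int × List Int)) (k : List Int) : Option (Int × List Int) :=
  match ms.filter (fun e => pvKey e == k) with
  | [x] => some x
  | _ => none

-- A's grouping fold, isolated
def pvStep (d : PySem.Dict (List Int) (List Int)) (e : Int × List Int) :
    PySem.Dict (List Int) (List Int) :=
  d.modify (pvKey e) [] (· ++ [e.1])

lemma pv_grp_cons (e : Int × List Int) (rest : List (Int × List Int)) (k : List Int) :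
    pvGrp (e :: rest) k = if pvKey e = k then e.1 :: pvGrp rest k else pvGrp rest k := by
  unfold pvGrp
  rw [List.filter_cons]
  by_cases h : pvKey e = k <;> simp [h]

lemma pv_items_groupFold (ms : List (Int × List Int)) (d : PySem.Dict (List Int) (List Int))
    (hnd : d.keys.Nodup) :
    (ms.foldl pvStep d).items
      = d.items.map (fun p => (p.1, p.2 ++ pvGrp ms p.1))
        ++ ((PySem.Set.ofList (ms.map pvKey)).filter (fun k => !d.contains k)).map
             (fun k => (k, pvGrp ms k)) := by
  induction ms generalizing d with
  | nil => simp [pvGrp]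
  | cons e rest ih =>
    have hstep : pvStep d e = d.insert (pvKey e) (d.getD (pvKey e) [] ++ [e.1]) := rfl
    have hnd' : (pvStep d e).keys.Nodup := by
      rw [hstep]; exact PySem.Dict.nodup_keys_insert _ _ _ hnd
    rw [List.foldl_cons, ih (pvStep d e) hnd']
    have hdis : (PySem.Set.ofList (rest.map pvKey)).discard (pvKey e)
        = (PySem.Set.ofList (rest.map pvKey)).filter (fun y => !(y == pvKey e)) := by
      simp [PySem.Set.discard]
    rw [List.map_cons, PySem.Set.ofList_cons, hdis, List.filter_cons]
    have hcont : ∀ k, (pvStep d e).contains k = (k == pvKey e || d.contains k) := by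
      intro k; rw [hstep]; exact PySem.Dict.contains_insert d _ k _
    by_cases hc : d.contains (pvKey e) = true
    · -- key already grouped: items updated in place
      have hitems : (pvStep d e).items
          = d.items.map (fun p => if (p.1 == pvKey e) = true
              then (pvKey e, d.getD (pvKey e) [] ++ [e.1]) else p) := by
        rw [hstep]; exact PySem.Dict.items_insert_of_contains d _ hc
      have h1 : ((pvStep d e).items).map (fun p => (p.1, p.2 ++ pvGrp rest p.1))
          = d.items.map (fun p => (p.1, p.2 ++ pvGrp (e :: rest) p.1)) := by
        rw [hitems, List.map_map]
        apply List.map_congr_left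
        intro p hp
        by_cases hpk : p.1 = pvKey e
        · have hpv : d.getD p.1 [] = p.2 := by
            rcases p with ⟨pk, pv⟩
            exact PySem.Dict.getD_of_mem_items d hp hnd []
          simp only [Function.comp_apply, hpk, beq_self_eq_true, if_pos]
          rw [pv_grp_cons, if_pos rfl, ← hpk, hpv]
          simp
        · have hbk : (p.1 == pvKey e) = false := by simpa using hpk
          simp only [Function.comp_apply, hbk, Bool.false_eq_true, ite_false]
          rw [pv_grp_cons, if_neg (fun h => hpk h.symm)]
      have h2 : ((PySem.Set.ofList (rest.map pvKey)).filter (fun k => !(pvStep d e).contains k)).map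
            (fun k => (k, pvGrp rest k))
          = (if (!d.contains (pvKey e)) = true
              then pvKey e :: ((PySem.Set.ofList (rest.map pvKey)).filter (fun y => !(y == pvKey e))).filter (fun k => !d.contains k)
              else ((PySem.Set.ofList (rest.map pvKey)).filter (fun y => !(y == pvKey e))).filter (fun k => !d.contains k)).map
            (fun k => (k, pvGrp (e :: rest) k)) := by
        rw [if_neg (by simp [hc]), List.filter_filter]
        have hfe : (PySem.Set.ofList (rest.map pvKey)).filter (fun k => !(pvStep d e).contains k)
            = (PySem.Set.ofList (rest.map pvKey)).filter (fun k => !d.contains k && !(k == pvKey e)) := by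
          apply List.filter_congr
          intro k _
          rw [hcont k]
          cases hb : (k == pvKey e) <;> simp
        rw [hfe]
        apply List.map_congr_left
        intro k hk
        have hkne : (k == pvKey e) = false := by
          have := (List.mem_filter.mp hk).2
          cases hb : (k == pvKey e) <;> simp_all
        rw [pv_grp_cons, if_neg (by simpa using fun h => by rw [h] at hkne; simp at hkne)]
      rw [h1, h2]
    · -- fresh key: appended at the end
      have hcf : d.contains (pvKey e) = false := by simp_all
      have hitems : (pvStep d e).items = d.items ++ [(pvKey e, [e.1])] := by
        rw [hstep, PySem.Dict.getD_of_not_contains d [] hcf]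
        exact PySem.Dict.items_insert_of_not_contains d _ hcf
      rw [hitems, List.map_append]
      have h1 : d.items.map (fun p => (p.1, p.2 ++ pvGrp rest p.1))
          = d.items.map (fun p => (p.1, p.2 ++ pvGrp (e :: rest) p.1)) := by
        apply List.map_congr_left
        intro p hp
        have hpk : p.1 ≠ pvKey e := by
          intro h
          have : d.contains p.1 = true :=
            (PySem.Dict.contains_iff_mem_keys d p.1).mpr (PySem.Dict.mem_keys_of_mem_items d hp)
          rw [h] at this; rw [this] at hcf; exact absurd hcf (by simp)
        rw [pv_grp_cons, if_neg (fun h => hpk h.symm)]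
      have h2 : ((PySem.Set.ofList (rest.map pvKey)).filter (fun k => !(pvStep d e).contains k)).map
            (fun k => (k, pvGrp rest k))
          = (((PySem.Set.ofList (rest.map pvKey)).filter (fun y => !(y == pvKey e))).filter
              (fun k => !d.contains k)).map (fun k => (k, pvGrp (e :: rest) k)) := by
        rw [List.filter_filter]
        have hfe : (PySem.Set.ofList (rest.map pvKey)).filter (fun k => !(pvStep d e).contains k)
            = (PySem.Set.ofList (rest.map pvKey)).filter (fun k => !d.contains k && !(k == pvKey e)) := by
          apply List.filter_congr
          intro k _
          rw [hcont k]
          cases hb : (k == pvKey e) <;> simp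
        rw [hfe]
        apply List.map_congr_left
        intro k hk
        have hkne : (k == pvKey e) = false := by
          have := (List.mem_filter.mp hk).2
          cases hb : (k == pvKey e) <;> simp_all
        rw [pv_grp_cons, if_neg (by simpa using fun h => by rw [h] at hkne; simp at hkne)]
      rw [h1, h2, if_pos (by simp [hcf])]
      simp [pv_grp_cons]

lemma pv_scan (ms : List (Int × List Int)) (seen : List (List Int)) :
    ((PySem.Set.ofList (ms.map pvKey)).filter (fun k => !seen.contains k)).filterMap (pvMatch ms)
      = ms.filter (fun e => !seen.contains (pvKey e) && decide ((ms.map pvKey).count (pvKey e) = 1)) := by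
  induction ms generalizing seen with
  | nil => simp
  | cons e rest ih =>
    have hdis : (PySem.Set.ofList (rest.map pvKey)).discard (pvKey e)
        = (PySem.Set.ofList (rest.map pvKey)).filter (fun y => !(y == pvKey e)) := by
      simp [PySem.Set.discard]
    rw [List.map_cons, PySem.Set.ofList_cons, hdis]
    simp only [List.filter_cons]
    -- the two key filters merge into the (pvKey e :: seen) filter
    have htail0 : ((PySem.Set.ofList (rest.map pvKey)).filter (fun y => !(y == pvKey e))).filter
          (fun k => !seen.contains k)
        = (PySem.Set.ofList (rest.map pvKey)).filter (fun k => !(pvKey e :: seen).contains k) := by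
      rw [List.filter_filter]
      apply List.filter_congr
      intro k _
      cases hb : (k == pvKey e) <;> simp <;> simp_all
    -- on the surviving keys, pvMatch over e :: rest is pvMatch over rest
    have hmc : ∀ k ∈ (PySem.Set.ofList (rest.map pvKey)).filter (fun k => !(pvKey e :: seen).contains k),
        pvMatch (e :: rest) k = pvMatch rest k := by
      intro k hk
      have h2 := (List.mem_filter.mp hk).2
      simp only [List.contains_cons, Bool.not_or, Bool.and_eq_true, Bool.not_eq_true'] at h2
      have hne : (pvKey e == k) = false := by
        simp only [beq_eq_false_iff_ne]
        intro h; rw [h] at h2; simp at h2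
      unfold pvMatch
      rw [List.filter_cons, hne]
      simp
    -- the rescan condition over e :: rest equals the rescan over rest with pvKey e marked seen
    have hcond : ∀ e' ∈ rest,
        (!seen.contains (pvKey e') && decide ((pvKey e :: rest.map pvKey).count (pvKey e') = 1))
          = (!(pvKey e :: seen).contains (pvKey e') && decide ((rest.map pvKey).count (pvKey e') = 1)) := by
      intro e' he'
      by_cases hk : pvKey e' = pvKey e
      · rw [hk]
        have hmem : pvKey e ∈ rest.map pvKey := hk ▸ List.mem_map.mpr ⟨e', he', rfl⟩
        have hpos : 0 < (rest.map pvKey).count (pvKey e) := List.count_pos_iff.mpr hmem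
        have hfa : ((rest.map pvKey).count (pvKey e) + 1 = 1) = False := by
          simp; omega
        simp [List.count_cons_self]
        intro _; omega
      · rw [List.count_cons, if_neg (by simp only [beq_iff_eq]; exact fun h => hk h.symm)]
        simp [hk]
    rw [List.filter_congr hcond, ← ih (pvKey e :: seen)]
    by_cases hseen : seen.contains (pvKey e) = true
    · have hmemseen : pvKey e ∈ seen := by simpa using hseen
      rw [if_neg (by simp [hmemseen]), if_neg (by simp [hmemseen])]
      rw [htail0]
      exact List.filterMap_congr hmc
    · have hnseen : pvKey e ∉ seen := by simp_all
      rw [if_pos (by simp [hnseen])]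
      by_cases hm : pvKey e ∈ rest.map pvKey
      · have hcnt : List.count (pvKey e) (pvKey e :: rest.map pvKey) ≠ 1 := by
          have := List.count_pos_iff.mpr hm
          simp [List.count_cons_self]; omega
        have hmtch : pvMatch (e :: rest) (pvKey e) = none := by
          unfold pvMatch
          rw [List.filter_cons]
          rcases hf : rest.filter (fun e' => pvKey e' == pvKey e) with _ | ⟨x, t⟩
          · exfalso
            obtain ⟨e'', he'', hk''⟩ := List.mem_map.mp hm
            have : e'' ∈ rest.filter (fun e' => pvKey e' == pvKey e) :=
              List.mem_filter.mpr ⟨he'', by simp [hk'']⟩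
            rw [hf] at this; simp at this
          · simp
        rw [if_neg (by simp [hnseen]; have := List.count_pos_iff.mpr hm; omega)]
        rw [List.filterMap_cons, hmtch, htail0]
        exact List.filterMap_congr hmc
      · have hone : List.count (pvKey e) (pvKey e :: rest.map pvKey) = 1 := by
          have := List.count_eq_zero.mpr hm
          simp [List.count_cons_self, this]
        have hmtch : pvMatch (e :: rest) (pvKey e) = some e := by
          unfold pvMatch
          rw [List.filter_cons]
          have hf : rest.filter (fun e' => pvKey e' == pvKey e) = [] := by
            rw [List.filter_eq_nil_iff]
            intro a ha hcon
            exact hm (List.mem_map.mpr ⟨a, ha, by simpa using hcon⟩)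
          simp [hf]
        rw [if_pos (by simp [hnseen, hone])]
        rw [List.filterMap_cons, hmtch, htail0]
        rw [List.filterMap_congr hmc]

lemma pv_filter_map_if {α β : Type} (l : List α) (p : α → Bool) (f : α → β) :
    (l.filter p).map f = l.filterMap (fun a => if p a then some (f a) else none) := by
  induction l with
  | nil => rfl
  | cons x t ih => simp only [List.filter_cons, List.filterMap_cons]; split <;> simp [ih]

lemma pv_pick (ms : List (Int × List Int)) (k : List Int) :
    (if decide ((pvGrp ms k).length = 1) = true then some (PySem.List.pyGetD (pvGrp ms k) 0 0) else none)
      = (pvMatch ms k).map Prod.fst := by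
  unfold pvGrp pvMatch
  rcases h : ms.filter (fun e => pvKey e == k) with _ | ⟨x, _ | ⟨y, t⟩⟩ <;>
    simp [PySem.List.pyGetD]

lemma pv_A_eq (rg : List (Int × List Int)) : find_unique_multiparent_nodes rg = pvS rg := by
  unfold find_unique_multiparent_nodes pvS
  simp only []
  rw [PySem.List.foldl_ite_eq_foldl_filter (p := fun e : Int × List Int => 1 < (pvFrozen e.2).length)]
  have hms : rg.filter (fun e => decide (1 < (pvFrozen e.2).length)) = pvMs rg := rfl
  rw [hms]
  set ms := pvMs rg with hmsdef
  -- A's grouping fold is pvStep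
  have hA : ms.foldl (fun d e =>
      if d.contains (pvFrozen e.2) = true then d.insert (pvFrozen e.2) (d.getD (pvFrozen e.2) [] ++ [e.1])
      else d.insert (pvFrozen e.2) [e.1]) PySem.Dict.empty = ms.foldl pvStep PySem.Dict.empty := by
    apply PySem.List.foldl_congr_mem
    intro d e he
    by_cases hc : d.contains (pvFrozen e.2) = true
    · simp [hc, pvStep, pvKey, PySem.Dict.modify]
    · simp only [Bool.not_eq_true] at hc
      simp [hc, pvStep, pvKey, PySem.Dict.modify, PySem.Dict.getD_of_not_contains d [] hc]
  rw [hA]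
  rw [pv_items_groupFold ms PySem.Dict.empty (by simp)]
  have hie : (PySem.Dict.empty : PySem.Dict (List Int) (List Int)).items = [] := rfl
  simp only [hie, List.map_nil, List.nil_append, PySem.Dict.contains_empty, Bool.not_false,
    List.filter_true]
  rw [PySem.List.foldl_append_ite (p := fun p : (List Int) × (List Int) => p.2.length = 1)
    (f := fun p => PySem.List.pyGetD p.2 0 0)]
  rw [List.filter_map, List.map_map]
  rw [pv_filter_map_if]
  rw [List.filterMap_congr (g := fun k => (pvMatch ms k).map Prod.fst)
    (fun k _ => by simpa using pv_pick ms k)]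
  rw [← List.map_filterMap]
  have hscan := pv_scan ms []
  simp only [List.contains_nil, Bool.not_false, List.filter_true, Bool.true_and] at hscan
  rw [hscan]
  simp

-- ---------- B-side ----------

-- the entries list built by B's first loop, in closed form
def pvE (rg : List (Int × List Int)) : List (List Int × Int × Int) :=
  ((PySem.List.enumerate rg).filter (fun e => decide (1 < (pvFrozen e.2.2).length))).map
    (fun e => (pvFrozen e.2.2, e.1, e.2.1))

lemma pv_enum_fst_ge {α : Type} (xs : List α) (s : Int) :
    ∀ e ∈ PySem.List.enumerate xs s, s ≤ e.1 := by
  induction xs generalizing s with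
  | nil => intro e he; simp [PySem.List.enumerate_nil] at he
  | cons x t ih =>
    intro e he
    rw [PySem.List.enumerate_cons] at he
    rcases List.mem_cons.mp he with rfl | hm
    · simp
    · have := ih (s + 1) e hm
      omega

lemma pv_E_aux (rg : List (Int × List Int)) (s : Int) :
    ((((PySem.List.enumerate rg s).filter (fun e => decide (1 < (pvFrozen e.2.2).length))).map
        (fun e => (pvFrozen e.2.2, e.1, e.2.1))).map (fun t => (t.1, t.2.2))
      = (pvMs rg).map (fun e => (pvKey e, e.1)))
    ∧ (((PySem.List.enumerate rg s).filter (fun e => decide (1 < (pvFrozen e.2.2).length))).map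
        (fun e => (pvFrozen e.2.2, e.1, e.2.1))).Pairwise (fun a b => a.2.1 < b.2.1) := by
  induction rg generalizing s with
  | nil => simp [PySem.List.enumerate_nil, pvMs]
  | cons x t ih =>
    rw [PySem.List.enumerate_cons]
    have hmem : ∀ u ∈ ((PySem.List.enumerate t (s+1)).filter
        (fun e => decide (1 < (pvFrozen e.2.2).length))).map
        (fun e => (pvFrozen e.2.2, e.1, e.2.1)), s < u.2.1 := by
      intro u hu
      obtain ⟨e, he, rfl⟩ := List.mem_map.mp hu
      have := pv_enum_fst_ge t (s+1) e (List.mem_filter.mp he).1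
      simpa using by omega
    have ihs := ih (s + 1)
    rw [List.filter_cons]
    have hpm : pvMs (x :: t) = if decide (1 < (pvFrozen x.2).length) = true
        then x :: pvMs t else pvMs t := by
      unfold pvMs; rw [List.filter_cons]
    by_cases hx : 1 < (pvFrozen x.2).length
    · constructor
      · rw [hpm]
        simp only [hx, decide_true, if_pos, List.map_cons]
        exact congrArg (List.cons _) ihs.1
      · simp only [hx, decide_true, if_pos, List.map_cons]
        exact List.pairwise_cons.mpr ⟨hmem, ihs.2⟩
    · constructor
      · rw [hpm]
        simp only [hx, decide_false, Bool.false_eq_true, ite_false]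
        exact ihs.1
      · simp only [hx, decide_false, Bool.false_eq_true, ite_false]
        exact ihs.2

lemma pv_fold_entries (rg : List (Int × List Int)) :
    (PySem.List.enumerate rg).foldl (fun acc e =>
        if 1 < (pvFrozen e.2.2).length then acc ++ [(pvFrozen e.2.2, e.1, e.2.1)] else acc) []
      = pvE rg := by
  rw [PySem.List.foldl_ite_eq_foldl_filter
    (p := fun e : Int × (Int × List Int) => 1 < (pvFrozen e.2.2).length)
    (f := fun acc (e : Int × (Int × List Int)) => acc ++ [(pvFrozen e.2.2, e.1, e.2.1)])]
  rw [PySem.List.foldl_append_singleton_eq_map]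
  simp [pvE]

-- in a key-sorted list bounded below by k, everything after the leading run of key k has a
-- strictly larger key
lemma pv_dropWhile_gt (k : List Int) (L : List (List Int × Int × Int))
    (hp : L.Pairwise (fun a b => a.1 ≤ b.1)) (hge : ∀ u ∈ L, k ≤ u.1) :
    ∀ u ∈ L.dropWhile (fun u => u.1 == k), k < u.1 := by
  induction L with
  | nil => simp
  | cons v vs ih =>
    have hpc := List.pairwise_cons.mp hp
    cases hv : (v.1 == k) with
    | true =>
      rw [List.dropWhile_cons, if_pos hv]
      exact ih hpc.2 (fun u hu => hge u (List.mem_cons_of_mem _ hu))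
    | false =>
      rw [List.dropWhile_cons, if_neg (by simp [hv])]
      intro u hu
      have hvk : k < v.1 := by
        refine lt_of_le_of_ne (hge v List.mem_cons_self) (fun h => ?_)
        rw [← h] at hv; simp at hv
      rcases List.mem_cons.mp hu with rfl | hu
      · exact hvk
      · exact lt_of_lt_of_le hvk (hpc.1 u hu)

-- the run scan over a key-sorted list keeps exactly the entries whose key occurs once
lemma pv_runScan_sorted (l : List (List Int × Int × Int))
    (h : l.Pairwise (fun a b => a.1 ≤ b.1)) :
    pvRunScan l
      = (l.filter (fun t => decide (List.count t.1 (l.map (fun u => u.1)) = 1))).map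
          (fun t => (t.2.1, t.2.2)) := by
  induction l using pvRunScan.induct with
  | case1 => simp [pvRunScan]
  | case2 t rest ih =>
    set run := rest.takeWhile (fun u => u.1 == t.1) with hrun
    set rest' := rest.dropWhile (fun u => u.1 == t.1) with hrest'
    have hsplit : rest = run ++ rest' := (List.takeWhile_append_dropWhile).symm
    have hpc := List.pairwise_cons.mp h
    have hrunkey : ∀ u ∈ run, u.1 = t.1 := by
      intro u hu
      have := List.mem_takeWhile_imp hu
      simpa using this
    -- every element of rest' has key strictly greater than t.1
    have hgt : ∀ u ∈ rest', t.1 < u.1 := by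
      rw [hrest']
      exact pv_dropWhile_gt t.1 rest hpc.2 hpc.1
    have hne : ∀ u ∈ rest', (u.1 == t.1) = false := by
      intro u hu; have := hgt u hu
      simp only [beq_eq_false_iff_ne]; intro hc; rw [hc] at this; exact lt_irrefl _ this
    have hnet : ∀ u ∈ rest', (t.1 == u.1) = false := by
      intro u hu; have := hgt u hu
      simp only [beq_eq_false_iff_ne]; intro hc; rw [hc] at this; exact lt_irrefl _ this
    -- counts over the whole list
    have hmap : (t :: rest).map (fun u => u.1)
        = t.1 :: (run.map (fun u => u.1) ++ rest'.map (fun u => u.1)) := by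
      rw [hsplit]; simp
    have hcount_t : List.count t.1 ((t :: rest).map (fun u => u.1)) = 1 + run.length := by
      rw [hmap, List.count_cons_self, List.count_append]
      have h1 : List.count t.1 (run.map (fun u => u.1)) = run.length := by
        rw [List.count_eq_length.mpr]
        · simp
        · intro k hk
          obtain ⟨u, hu, rfl⟩ := List.mem_map.mp hk
          simp [hrunkey u hu]
      have h2 : List.count t.1 (rest'.map (fun u => u.1)) = 0 := by
        rw [List.count_eq_zero]
        intro hc
        obtain ⟨u, hu, hk⟩ := List.mem_map.mp hc
        have := hgt u hu; rw [hk] at this; exact lt_irrefl _ this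
      omega
    have hcount_run : ∀ u ∈ run,
        List.count u.1 ((t :: rest).map (fun v => v.1)) = 1 + run.length := by
      intro u hu; rw [hrunkey u hu]; exact hcount_t
    have hcount_rest : ∀ u ∈ rest',
        List.count u.1 ((t :: rest).map (fun v => v.1))
          = List.count u.1 (rest'.map (fun v => v.1)) := by
      intro u hu
      rw [hmap, List.count_cons, List.count_append]
      have h0 : List.count u.1 (run.map (fun v => v.1)) = 0 := by
        rw [List.count_eq_zero]
        intro hc
        obtain ⟨v, hv, hk⟩ := List.mem_map.mp hc
        have := hgt u hu
        rw [← hk, hrunkey v hv] at this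
        exact lt_irrefl _ this
      have h1 : (u.1 == t.1) = false := hne u hu
      simp [h0, beq_iff_eq] at h1 ⊢
      intro hc; rw [hc] at h1; simp at h1
    -- filter over the whole list, split at the run boundary
    have hfiltr : (rest'.filter (fun u => decide
          (List.count u.1 ((t :: rest).map (fun v => v.1)) = 1)))
        = rest'.filter (fun u => decide (List.count u.1 (rest'.map (fun v => v.1)) = 1)) := by
      apply List.filter_congr
      intro u hu
      rw [hcount_rest u hu]
    have hpr' : rest'.Pairwise (fun a b => a.1 ≤ b.1) :=
      hpc.2.sublist (hrest' ▸ List.dropWhile_sublist _)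
    rw [pvRunScan]
    rw [ih hpr']
    rw [List.filter_cons]
    by_cases hempty : run = []
    · rw [if_pos (by rw [← hrun, hempty])]
      have hkeep : (decide (List.count t.1 ((t :: rest).map (fun u => u.1)) = 1)) = true := by
        rw [hcount_t, hempty]
        simp
      rw [hkeep, if_pos rfl]
      have : rest = rest' := by rw [hsplit, hempty]; simp
      rw [← this] at hfiltr ⊢
      have hrw : rest.filter (fun u => decide
            (List.count u.1 ((t :: rest).map (fun v => v.1)) = 1))
          = rest.filter (fun u => decide (List.count u.1 (rest.map (fun v => v.1)) = 1)) := hfiltr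
      rw [hrw]
      simp
    · rw [if_neg (by rw [← hrun]; exact hempty)]
      have hdrop : (decide (List.count t.1 ((t :: rest).map (fun u => u.1)) = 1)) = false := by
        rw [hcount_t]
        have h0 : 0 < run.length := List.length_pos_iff.mpr hempty
        simp only [decide_eq_false_iff_not]
        omega
      rw [hdrop, if_neg (by simp)]
      -- the run entries are all dropped by the filter too
      have hnil : run.filter (fun u => decide
          (List.count u.1 ((t :: rest).map (fun v => v.1)) = 1)) = [] := by
        rw [List.filter_eq_nil_iff]
        intro u hu
        rw [hcount_run u hu]
        have h0 : 0 < run.length := List.length_pos_iff.mpr hempty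
        simp only [decide_eq_true_eq]
        omega
      have hfilter_split : rest.filter (fun u => decide
            (List.count u.1 ((t :: rest).map (fun v => v.1)) = 1))
          = rest'.filter (fun u => decide
            (List.count u.1 ((t :: rest).map (fun v => v.1)) = 1)) := by
        have hc := congrArg (List.filter (fun u => decide
            (List.count u.1 ((t :: rest).map (fun v => v.1)) = 1))) hsplit
        rw [List.filter_append, hnil, List.nil_append] at hc
        exact hc
      rw [hfilter_split, hfiltr]
      simp

lemma pv_B_eq (rg : List (Int × List Int)) : find_unique_multiparent_nodes_alt rg = pvS rg := by
  unfold find_unique_multiparent_nodes_alt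
  simp only []
  rw [pv_fold_entries]
  set E := pvE rg with hE
  -- the key-sorted entries: a permutation of E, pairwise ≤ on the key
  have hperm : (pvSortK E).Perm E :=
    @PySem.List.sorted_perm _ _ Preorder.toLT LinearOrder.toDecidableLT E (fun t => t.1) false
  have hpair : (pvSortK E).Pairwise (fun a b => a.1 ≤ b.1) :=
    PySem.List.sorted_pairwise E (fun t => t.1)
  -- counts of any key agree between the sorted and the original entries
  have hcnt : ∀ k : List Int, List.count k ((pvSortK E).map (fun u => u.1))
      = List.count k (E.map (fun u => u.1)) := fun k => (hperm.map _).count_eq k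
  -- run scan = filter by unique key
  rw [pv_runScan_sorted _ hpair]
  have hfc : (pvSortK E).filter (fun t => decide (List.count t.1 ((pvSortK E).map (fun u => u.1)) = 1))
      = (pvSortK E).filter (fun t => decide (List.count t.1 (E.map (fun u => u.1)) = 1)) := by
    apply List.filter_congr
    intro t _
    rw [hcnt t.1]
  rw [hfc]
  -- name the picked list in input order
  set P : (List Int × Int × Int) → Bool :=
    fun t => decide (List.count t.1 (E.map (fun u => u.1)) = 1) with hP
  have hpermP : (((pvSortK E).filter P).map (fun t => (t.2.1, t.2.2))).Perm
      ((E.filter P).map (fun t => (t.2.1, t.2.2))) := (hperm.filter P).map _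
  have hpairE : (E.filter P).Pairwise (fun a b => a.2.1 < b.2.1) :=
    (pv_E_aux rg 0).2.filter P
  have hpairT : ((E.filter P).map (fun t => (t.2.1, t.2.2))).Pairwise
      (fun a b => a.1 < b.1) := by
    rw [List.pairwise_map]
    exact hpairE.imp (fun h => h)
  have hsort : pvSortI (((pvSortK E).filter P).map (fun t => (t.2.1, t.2.2)))
      = (E.filter P).map (fun t => (t.2.1, t.2.2)) := by
    unfold pvSortI
    exact PySem.List.sorted_eq_of_perm_of_pairwise_lt _ _ (fun t => t.1) hpermP.symm hpairT
  rw [hsort, List.map_map]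
  -- transport through the (key, node_id) projection to the input-order normal form
  have hEmap : E.map (fun t => (t.1, t.2.2)) = (pvMs rg).map (fun e => (pvKey e, e.1)) :=
    (pv_E_aux rg 0).1
  have hkeysE : E.map (fun u => u.1) = (pvMs rg).map pvKey := by
    have h1 : (E.map (fun t => (t.1, t.2.2))).map Prod.fst
        = ((pvMs rg).map (fun e => (pvKey e, e.1))).map Prod.fst := by rw [hEmap]
    simpa [List.map_map, Function.comp] using h1
  -- both sides as filter-then-map over the common pair list
  have hL : (E.filter P).map ((fun t : Int × Int => t.2) ∘ (fun t => (t.2.1, t.2.2)))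
      = ((E.map (fun t => (t.1, t.2.2))).filter
          (fun p => decide (List.count p.1 ((pvMs rg).map pvKey) = 1))).map Prod.snd := by
    rw [List.filter_map, List.map_map]
    congr 1
    apply List.filter_congr
    intro t _
    simp [hP, hkeysE]
  have hR : pvS rg = ((( pvMs rg).map (fun e => (pvKey e, e.1))).filter
      (fun p => decide (List.count p.1 ((pvMs rg).map pvKey) = 1))).map Prod.snd := by
    unfold pvS
    rw [List.filter_map, List.map_map]
    rfl
  rw [hL, hEmap, ← hR]

-- ===== VERDICT (by name: the statement is the Claim_ definition above) =====
theorem find_unique_multiparent_nodes_spec : Claim_equal_find_unique_multiparent_nodes := by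
  intro rg _
  unfold Spec_find_unique_multiparent_nodes
  rw [pv_A_eq, pv_B_eq]
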